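-- pv_equiv track=rewrite | github.com/anon-artifacts/ParetoMyth | optimizers/BOCAOptimizer.py | _enumerate_important_settings
-- ===== SOURCE A (Python) =====
-- def _enumerate_important_settings(important):
--     """Return all 2^K bit assignments for important optimizations."""
--     K = len(important)
--     settings = []
--
--     for i in range(2 ** K):
--         bits = format(i, f"0{K}b")
--         cfg = {important[j]: int(bits[j]) for j in range(K)}
--         settings.append(cfg)
--
--     return settings
-- ===== SOURCE B (Python) =====
-- def _enumerate_important_settings(important):
--     """Return all 2^K bit assignments for important optimizations."""
--     settings = [{}]
--     for key in important:
--         new_settings = []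
--         for cfg in settings:
--             new_settings.append({**cfg, key: 0})
--             new_settings.append({**cfg, key: 1})
--         settings = new_settings
--     return settings
-- ===== Notes on version B (the rewrite author's own statement) =====
-- stated objective: alternative
-- what changed: Instead of looping over all 2^K integers and formatting each as a zero-padded binary string whose bits are indexed per key, B starts from [{}] and doubles the table once per key, extending every partial assignment with key=0 then key=1.
import Mathlib
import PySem

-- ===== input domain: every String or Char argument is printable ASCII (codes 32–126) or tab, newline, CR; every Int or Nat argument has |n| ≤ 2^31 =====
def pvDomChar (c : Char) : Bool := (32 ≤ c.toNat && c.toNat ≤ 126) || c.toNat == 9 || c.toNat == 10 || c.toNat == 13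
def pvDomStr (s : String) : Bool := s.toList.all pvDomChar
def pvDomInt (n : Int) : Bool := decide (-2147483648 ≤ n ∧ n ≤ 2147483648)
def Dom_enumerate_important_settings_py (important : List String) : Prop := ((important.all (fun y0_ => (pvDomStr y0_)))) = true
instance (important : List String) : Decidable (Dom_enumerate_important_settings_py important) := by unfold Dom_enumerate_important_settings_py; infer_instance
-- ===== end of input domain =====

-- B builds the 2^K assignment table by doubling it once per key instead of formatting
-- each of the 2^K integers as a zero-padded binary string and indexing its bits.

-- ===== PORT A =====
-- A loops i over range(2**K), takes bits = format(i, f"0{K}b") — ported as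
-- PySem.Int.toBinChars i zero-padded on the left to width K, exact for the i ≥ 0 this
-- loop produces — and builds the dict {important[j]: int(bits[j]) for j in range(K)}.
-- The indices j are always in range, so pyGetD is exact; int(bits[j]) on the single
-- digit character is PySem.Int.ofChars?, which always returns some here.
def enumerate_important_settings_py (important : List String) : List (List (String × Int)) :=
  let K := important.length
  ((PySem.List.pyRange 0 ((2 : Int) ^ K) 1).foldl
    (fun (settings : List (PySem.Dict String Int)) i =>
      let bits : List Char :=
        List.replicate (K - (PySem.Int.toBinChars i).length) '0' ++ PySem.Int.toBinChars i
      let cfg : PySem.Dict String Int :=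
        (PySem.List.pyRange 0 (K : Int) 1).foldl
          (fun d j =>
            d.insert (PySem.List.pyGetD important j "")
              ((PySem.Int.ofChars? [PySem.List.pyGetD bits j '0']).getD 0))
          PySem.Dict.empty
      settings ++ [cfg])
    []).map (·.items)

-- ===== PORT B =====
-- B starts from [{}] and, for each key, replaces every partial assignment cfg by the
-- pair {**cfg, key: 0}, {**cfg, key: 1} (the 0-copy first), doubling the table.
def enumerate_important_settings_py_alt (important : List String) : List (List (String × Int)) :=
  (important.foldl
    (fun (settings : List (PySem.Dict String Int)) key =>
      settings.flatMap (fun cfg => [cfg.insert key 0, cfg.insert key 1]))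
    [PySem.Dict.empty]).map (·.items)

-- ===== PRECONDITION & SPEC =====
def Spec_enumerate_important_settings_py (important : List String) (out : List (List (String × Int))) : Prop := out = enumerate_important_settings_py_alt important
instance (important : List String) (out : List (List (String × Int))) : Decidable (Spec_enumerate_important_settings_py important out) := by unfold Spec_enumerate_important_settings_py; infer_instance

-- ===== CLAIM (what is proved, stated in full; the proofs are below) =====
def Claim_equal_enumerate_important_settings_py : Prop := ∀ (important : List String), Dom_enumerate_important_settings_py important → Spec_enumerate_important_settings_py important (enumerate_important_settings_py important)

-- ===== LEMMAS AND PROOFS =====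

-- The dict built by A for row i (i = the integer whose bits are formatted).
def pvCfgA (important : List String) (i : Int) : PySem.Dict String Int :=
  let K := important.length
  let bits : List Char :=
    List.replicate (K - (PySem.Int.toBinChars i).length) '0' ++ PySem.Int.toBinChars i
  (PySem.List.pyRange 0 (K : Int) 1).foldl
    (fun d j =>
      d.insert (PySem.List.pyGetD important j "")
        ((PySem.Int.ofChars? [PySem.List.pyGetD bits j '0']).getD 0))
    PySem.Dict.empty

def pvDictsA (important : List String) : List (PySem.Dict String Int) :=
  (PySem.List.pyRange 0 ((2 : Int) ^ important.length) 1).map (pvCfgA important)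

lemma pvA_as_map (important : List String) :
    enumerate_important_settings_py important = (pvDictsA important).map (·.items) := by
  simp only [enumerate_important_settings_py, pvDictsA,
    PySem.List.foldl_append_singleton_eq_map, List.nil_append]
  rfl

-- The reversed binary digits of n, MSB first (what Nat.toDigits 2 computes).
def pvBits (n : Nat) : List Char :=
  if h : n / 2 = 0 then [(n % 2).digitChar] else pvBits (n / 2) ++ [(n % 2).digitChar]
termination_by n
decreasing_by exact Nat.div_lt_self (by omega) (by omega)

lemma pvToDigitsCore_eq (n : Nat) : ∀ (f : Nat) (ds : List Char), n < f →
    Nat.toDigitsCore 2 f n ds = pvBits n ++ ds := by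
  induction n using Nat.strong_induction_on with
  | _ n ih =>
    intro f ds hf
    match f with
    | f + 1 =>
      by_cases h : n / 2 = 0
      · rw [pvBits]
        simp only [Nat.toDigitsCore]
        simp [h]
      · rw [pvBits, dif_neg h]
        simp only [Nat.toDigitsCore, h, if_false]
        rw [ih (n / 2) (by omega) f ((n % 2).digitChar :: ds) (by omega)]
        simp

lemma pvToBinChars_natCast (m : Nat) : PySem.Int.toBinChars (m : Int) = pvBits m := by
  rw [PySem.Int.toBinChars]
  rw [if_neg (by omega)]
  have : ((m : Int)).toNat = m := by omega
  rw [this, Nat.toDigits, pvToDigitsCore_eq m (m + 1) [] (by omega), List.append_nil]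

lemma pvBits_length_le (K : Nat) : ∀ m : Nat, 0 < K → m < 2 ^ K → (pvBits m).length ≤ K := by
  induction K with
  | zero => omega
  | succ K ih =>
    intro m _ hm
    rw [pvBits]
    by_cases h : m / 2 = 0
    · simp [h]
    · rw [dif_neg h]
      have hK : 0 < K := by
        by_contra hc
        have : K = 0 := by omega
        subst this
        simp at hm
        omega
      have := ih (m / 2) hK (by
        have : 2 ^ (K + 1) = 2 * 2 ^ K := by ring
        omega)
      simp only [List.length_append, List.length_singleton]
      omega

-- A's padded bit string for row i at width K.
def pvPad (K : Nat) (i : Int) : List Char :=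
  List.replicate (K - (PySem.Int.toBinChars i).length) '0' ++ PySem.Int.toBinChars i

lemma pvPad_length (K : Nat) (m : Nat) (hm : m < 2 ^ K) (hK : 0 < K) :
    (pvPad K (m : Int)).length = K := by
  have hle : (pvBits m).length ≤ K := pvBits_length_le K m hK hm
  simp [pvPad, pvToBinChars_natCast]
  omega

lemma pvBits_snoc (m b : Nat) (hm : 0 < m) (hb : b < 2) :
    pvBits (2 * m + b) = pvBits m ++ [b.digitChar] := by
  rw [pvBits]
  have h2 : (2 * m + b) / 2 = m := by omega
  have h3 : (2 * m + b) % 2 = b := by omega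
  rw [dif_neg (by omega), h2, h3]

lemma pvBits_zero : pvBits 0 = ['0'] := by rw [pvBits]; simp; decide

-- Padded bit strings at successive widths: bits(2m+b, K+1) = bits(m, K) ++ [digit b] for K ≥ 1.
lemma pvPad_snoc (K m b : Nat) (hm : m < 2 ^ K) (hb : b < 2) (hK : 0 < K) :
    pvPad (K + 1) ((2 * m + b : Nat) : Int) = pvPad K (m : Int) ++ [b.digitChar] := by
  simp only [pvPad, pvToBinChars_natCast]
  by_cases h : m = 0
  · subst h
    simp only [Nat.mul_zero, Nat.zero_add]
    rw [pvBits_zero]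
    have hbb : pvBits b = [b.digitChar] := by
      rw [pvBits]; simp [Nat.div_eq_of_lt hb, Nat.mod_eq_of_lt hb]
    rw [hbb]
    simp only [List.length_singleton, List.append_assoc]
    rw [show K + 1 - 1 = (K - 1) + 1 by omega, List.replicate_succ']
    simp [List.append_assoc]
  · rw [pvBits_snoc m b (by omega) hb]
    have hle : (pvBits m).length ≤ K := pvBits_length_le K m hK hm
    simp only [List.length_append, List.length_singleton]
    rw [show K + 1 - ((pvBits m).length + 1) = K - (pvBits m).length by omega]
    simp [List.append_assoc]

lemma pvPad_one (b : Nat) (hb : b < 2) : pvPad 1 ((b : Nat) : Int) = [b.digitChar] := by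
  simp only [pvPad, pvToBinChars_natCast]
  have hbb : pvBits b = [b.digitChar] := by
    rw [pvBits]; simp [Nat.div_eq_of_lt hb, Nat.mod_eq_of_lt hb]
  rw [hbb]; simp

lemma pvDigitVal (b : Nat) (hb : b < 2) :
    (PySem.Int.ofChars? [b.digitChar]).getD 0 = (b : Int) := by
  interval_cases b <;> decide

-- Key step: A's dict for row 2m+b over ks ++ [k] is A's dict for row m over ks with k ↦ b inserted.
set_option maxHeartbeats 1600000 in
lemma pvCfgA_snoc (ks : List String) (k : String) (m b : Nat)
    (hm : m < 2 ^ ks.length) (hb : b < 2) :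
    pvCfgA (ks ++ [k]) ((2 * m + b : Nat) : Int) =
      (pvCfgA ks (m : Int)).insert k (b : Int) := by
  have hlen : (ks ++ [k]).length = ks.length + 1 := by simp
  by_cases hK : ks.length = 0
  · -- ks = []: compute both sides directly
    have hks : ks = [] := List.eq_nil_of_length_eq_zero hK
    subst hks
    have hm0 : m = 0 := by simpa using hm
    subst hm0
    have h01 : PySem.List.pyRange 0 1 = [0] := by decide
    have h00 : PySem.List.pyRange 0 0 = [] := by decide
    have hpad : List.replicate (1 - (PySem.Int.toBinChars ((2 * 0 + b : Nat) : Int)).length) '0' ++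
        PySem.Int.toBinChars ((2 * 0 + b : Nat) : Int) = [b.digitChar] := by
      have := pvPad_one b hb
      simpa [pvPad] using this
    simp only [pvCfgA, List.nil_append, List.length_singleton, List.length_nil,
      Nat.cast_one, Nat.cast_zero, h01, h00, List.foldl_cons, List.foldl_nil]
    rw [hpad]
    rw [PySem.List.pyGetD_ofNat' [k] 0 "", PySem.List.pyGetD_ofNat' [b.digitChar] 0 '0']
    simp [pvDigitVal b hb]
  · -- ks.length ≥ 1
    have hK1 : 0 < ks.length := by omega
    simp only [pvCfgA, hlen]
    rw [show ((ks.length + 1 : Nat) : Int) = (ks.length : Int) + 1 by push_cast; ring,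
      PySem.List.pyRange_one_succ_right (by positivity), List.foldl_append]
    simp only [List.foldl_cons, List.foldl_nil]
    have hpadL : List.replicate (ks.length + 1 - (PySem.Int.toBinChars ((2 * m + b : Nat) : Int)).length) '0' ++
        PySem.Int.toBinChars ((2 * m + b : Nat) : Int) = pvPad ks.length (m : Int) ++ [b.digitChar] :=
      pvPad_snoc ks.length m b hm hb hK1
    rw [hpadL]
    have hlenR : (pvPad ks.length (m : Int)).length = ks.length :=
      pvPad_length ks.length m hm hK1
    have hkey : PySem.List.pyGetD (ks ++ [k]) ((ks.length : Nat) : Int) "" = k := by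
      rw [PySem.List.pyGetD_natCast, List.getD_append_right _ _ _ _ (Nat.le_refl _)]
      simp
    have hval : (PySem.Int.ofChars?
        [PySem.List.pyGetD (pvPad ks.length (m : Int) ++ [b.digitChar]) ((ks.length : Nat) : Int) '0']).getD 0
        = (b : Int) := by
      rw [PySem.List.pyGetD_natCast, List.getD_append_right _ _ _ _ (by omega)]
      simp [hlenR, pvDigitVal b hb]
    rw [hkey, hval]
    congr 1
    -- the prefix folds agree
    apply PySem.List.foldl_congr_mem
    intro acc j hj
    obtain ⟨hj0, hjK⟩ := PySem.List.mem_pyRange_one.mp hj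
    obtain ⟨n, rfl⟩ : ∃ n : Nat, j = (n : Int) := ⟨j.toNat, by omega⟩
    have hn : n < ks.length := by exact_mod_cast hjK
    simp only [PySem.List.pyGetD_natCast]
    have h1 : (ks ++ [k]).getD n "" = ks.getD n "" := List.getD_append _ _ _ _ hn
    have h2 : (pvPad ks.length (m : Int) ++ [b.digitChar]).getD n '0'
        = (List.replicate (ks.length - (PySem.Int.toBinChars (m : Int)).length) '0' ++
            PySem.Int.toBinChars (m : Int)).getD n '0' := by
      rw [List.getD_append _ _ _ _ (by omega)]
      rfl
    rw [h1, h2]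

lemma pvRange_two_mul (n : Nat) :
    List.range (2 * n) = (List.range n).flatMap (fun m => [2 * m, 2 * m + 1]) := by
  induction n with
  | zero => simp
  | succ n ih =>
    rw [show 2 * (n + 1) = (2 * n + 1) + 1 by omega, List.range_succ,
      show 2 * n + 1 = (2 * n) + 1 by omega, List.range_succ, ih, List.range_succ]
    simp

lemma pvDictsA_nil : pvDictsA [] = [PySem.Dict.empty] := by decide

lemma pvDictsA_snoc (ks : List String) (k : String) :
    pvDictsA (ks ++ [k]) =
      (pvDictsA ks).flatMap (fun cfg => [cfg.insert k 0, cfg.insert k 1]) := by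
  simp only [pvDictsA, List.length_append, List.length_singleton]
  rw [show ((2 : Int) ^ (ks.length + 1)) = ((2 ^ (ks.length + 1) : Nat) : Int) by push_cast; ring,
    show ((2 : Int) ^ ks.length) = ((2 ^ ks.length : Nat) : Int) by push_cast; ring,
    PySem.List.pyRange_zero_natCast, PySem.List.pyRange_zero_natCast,
    show 2 ^ (ks.length + 1) = 2 * 2 ^ ks.length by ring, pvRange_two_mul,
    List.map_flatMap, List.flatMap_map, List.map_flatMap]
  simp only [List.flatMap_def, List.map_map]
  apply congrArg
  apply List.map_congr_left
  intro m hmem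
  have hm : m < 2 ^ ks.length := List.mem_range.mp hmem
  simp only [Function.comp_apply, List.map_cons, List.map_nil]
  rw [show ((2 * m : Nat) : Int) = ((2 * m + 0 : Nat) : Int) by norm_num]
  rw [pvCfgA_snoc ks k m 0 hm (by omega), pvCfgA_snoc ks k m 1 hm (by omega)]
  norm_num

lemma pvDicts_eq (important : List String) :
    pvDictsA important =
      important.foldl
        (fun settings key => settings.flatMap (fun cfg => [cfg.insert key 0, cfg.insert key 1]))
        [PySem.Dict.empty] := by
  induction important using List.reverseRecOn with
  | nil => exact pvDictsA_nil
  | append_singleton ks k ih =>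
    rw [pvDictsA_snoc, ih, List.foldl_append]
    simp

-- ===== VERDICT (by name: the statement is the Claim_ definition above) =====
theorem enumerate_important_settings_py_spec : Claim_equal_enumerate_important_settings_py := by
  intro important _
  unfold Spec_enumerate_important_settings_py enumerate_important_settings_py_alt
  rw [pvA_as_map, pvDicts_eq]
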